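-- pv_equiv track=rewrite | github.com/cirosantilli/project-euler-solvers | solvers/233.py | multiplier_prefix_sum
-- ===== SOURCE A (Python) =====
-- from typing import List
--
-- def multiplier_prefix_sum(gmax: int, primes_mod1: List[int]) -> List[int]:
--     """
--     prefix[m] = sum_{1 <= t <= m, t has no prime factor p ≡ 1 (mod 4)} t
--
--     i.e. t's prime factors are only from {2} ∪ {p ≡ 3 (mod 4)}.
--     """
--     allowed = bytearray(b"\x01") * (gmax + 1)
--     allowed[0] = 0
--     for p in primes_mod1:
--         if p > gmax:
--             break
--         for m in range(p, gmax + 1, p):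
--             allowed[m] = 0
--
--     prefix = [0] * (gmax + 1)
--     s = 0
--     for i in range(1, gmax + 1):
--         if allowed[i]:
--             s += i
--         prefix[i] = s
--     return prefix
-- ===== SOURCE B (Python) =====
-- from typing import List
--
-- def multiplier_prefix_sum(gmax: int, primes_mod1: List[int]) -> List[int]:
--     # Trial division per number instead of a sieve table: i is allowed iff no
--     # relevant prime divides it; build the prefix list by appending a running sum.
--     ps = []
--     for p in primes_mod1:
--         if p > gmax:
--             break
--         ps.append(p)
--     prefix = [0]
--     s = 0
--     for i in range(1, gmax + 1):
--         if all(i % p for p in ps):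
--             s += i
--         prefix.append(s)
--     return prefix
-- ===== Notes on version B (the rewrite author's own statement) =====
-- stated objective: simpler
-- what changed: Replaces the bytearray multiple-marking sieve and the preallocated index-assigned prefix array with per-number trial division against the prime list and a prefix list built by appending a running sum.
-- outside the precondition, e.g. on multiplier_prefix_sum(4, [-3]): A returns [0, 1, 3, 6, 10], B returns [0, 1, 3, 3, 7]
import Mathlib
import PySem

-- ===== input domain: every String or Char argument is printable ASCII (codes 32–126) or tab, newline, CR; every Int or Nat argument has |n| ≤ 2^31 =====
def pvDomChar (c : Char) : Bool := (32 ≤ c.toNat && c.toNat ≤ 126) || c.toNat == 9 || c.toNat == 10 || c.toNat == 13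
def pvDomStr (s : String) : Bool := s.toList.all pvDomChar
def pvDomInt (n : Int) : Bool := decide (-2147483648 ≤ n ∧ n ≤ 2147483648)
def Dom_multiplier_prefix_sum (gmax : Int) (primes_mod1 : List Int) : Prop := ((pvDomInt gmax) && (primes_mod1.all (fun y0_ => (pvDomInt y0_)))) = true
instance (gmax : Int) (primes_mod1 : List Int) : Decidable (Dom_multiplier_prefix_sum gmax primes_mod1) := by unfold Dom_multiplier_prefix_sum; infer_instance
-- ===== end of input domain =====

-- B replaces A's bytearray sieve (marking multiples) by per-number trial division
-- against the prime list, building the prefix list by appending a running sum (objective: simpler).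

-- ===== PORT A =====
-- inner loop 'for m in range(p, gmax + 1, p): allowed[m] = 0'
def pvMark (gmax : Int) (allowed : List Int) (p : Int) : List Int :=
  (PySem.List.pyRange p (gmax + 1) p).foldl (fun a m => PySem.List.pySetD a m 0) allowed

-- 'for p in primes_mod1: if p > gmax: break; <mark multiples of p>'
def pvSieve (gmax : Int) : List Int → List Int → List Int
  | allowed, [] => allowed
  | allowed, p :: ps => if p > gmax then allowed else pvSieve gmax (pvMark gmax allowed p) ps

def multiplier_prefix_sum (gmax : Int) (primes_mod1 : List Int) : List Int :=
  let allowed0 := PySem.List.pySetD (List.replicate (gmax + 1).toNat (1 : Int)) 0 0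
  let allowed := pvSieve gmax allowed0 primes_mod1
  ((PySem.List.pyRange 1 (gmax + 1) 1).foldl
    (fun (st : List Int × Int) i =>
      let s := if PySem.List.pyGetD allowed i 0 != 0 then st.2 + i else st.2
      (PySem.List.pySetD st.1 i s, s))
    (List.replicate (gmax + 1).toNat (0 : Int), 0)).1

-- ===== PORT B =====
-- 'for p in primes_mod1: if p > gmax: break; ps.append(p)'
def pvTakeLe (gmax : Int) : List Int → List Int
  | [] => []
  | p :: ps => if p > gmax then [] else p :: pvTakeLe gmax ps

def multiplier_prefix_sum_alt (gmax : Int) (primes_mod1 : List Int) : List Int :=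
  let ps := pvTakeLe gmax primes_mod1
  ((PySem.List.pyRange 1 (gmax + 1) 1).foldl
    (fun (st : List Int × Int) i =>
      let s := if ps.all (fun p => PySem.Int.mod i p != 0) then st.2 + i else st.2
      (st.1 ++ [s], s))
    (([0] : List Int), 0)).1

-- ===== PRECONDITION & SPEC =====
-- Pre_ excludes gmax < 0 (A's empty bytearray makes allowed[0] = 0 raise IndexError) and
-- entries -gmax ≤ p ≤ 0 among the primes the loop actually processes (those before the
-- first p > gmax): p = 0 makes A raise ValueError (range step 0), and a negative p with
-- |p| ≤ gmax is silently ignored by A's empty range(p, gmax+1, p) — an accident of A's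
-- sieve that B's trial division does not mimic.
def Pre_multiplier_prefix_sum (gmax : Int) (primes_mod1 : List Int) : Prop :=
  0 ≤ gmax ∧ ∀ p ∈ primes_mod1.takeWhile (fun p => decide (p ≤ gmax)), 1 ≤ p ∨ p < -gmax
instance (gmax : Int) (primes_mod1 : List Int) : Decidable (Pre_multiplier_prefix_sum gmax primes_mod1) := by
  unfold Pre_multiplier_prefix_sum; infer_instance
def pvWitness_multiplier_prefix_sum : Int × List Int := (10, [5, 13])

def Spec_multiplier_prefix_sum (gmax : Int) (primes_mod1 : List Int) (out : List Int) : Prop := out = multiplier_prefix_sum_alt gmax primes_mod1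
instance (gmax : Int) (primes_mod1 : List Int) (out : List Int) : Decidable (Spec_multiplier_prefix_sum gmax primes_mod1 out) := by unfold Spec_multiplier_prefix_sum; infer_instance

-- ===== CLAIM (what is proved, stated in full; the proofs are below) =====
def Claim_equal_multiplier_prefix_sum : Prop := ∀ (gmax : Int) (primes_mod1 : List Int), Dom_multiplier_prefix_sum gmax primes_mod1 → Pre_multiplier_prefix_sum gmax primes_mod1 → Spec_multiplier_prefix_sum gmax primes_mod1 (multiplier_prefix_sum gmax primes_mod1)

-- ===== LEMMAS AND PROOFS =====

-- A's break loop processes exactly the ≤-gmax prefix that B collects.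
theorem pvSieve_eq_foldl (gmax : Int) : ∀ (ps : List Int) (a : List Int),
    pvSieve gmax a ps = (pvTakeLe gmax ps).foldl (pvMark gmax) a := by
  intro ps
  induction ps with
  | nil => intro a; rfl
  | cons p ps ih =>
      intro a
      by_cases h : p > gmax
      · simp [pvSieve, pvTakeLe, h]
      · simp [pvSieve, pvTakeLe, h, ih]

theorem pvTakeLe_eq_takeWhile (gmax : Int) : ∀ (ps : List Int),
    pvTakeLe gmax ps = ps.takeWhile (fun p => decide (p ≤ gmax)) := by
  intro ps
  induction ps with
  | nil => rfl
  | cons p ps ih =>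
      by_cases h : p ≤ gmax
      · have h' : ¬ p > gmax := by omega
        simp [pvTakeLe, h', List.takeWhile_cons, h, ih]
      · have h' : p > gmax := by omega
        simp [pvTakeLe, h', List.takeWhile_cons, h]

theorem foldl_pySetD_length (ms : List Int) : ∀ (a : List Int),
    (ms.foldl (fun a m => PySem.List.pySetD a m (0 : Int)) a).length = a.length := by
  induction ms with
  | nil => intro a; rfl
  | cons m ms ih => intro a; simp [List.foldl, ih, PySem.List.length_pySetD]

theorem foldl_pySetD_getD (ms : List Int) : ∀ (a : List Int) (j : Nat),
    (∀ m ∈ ms, 0 ≤ m) → j < a.length →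
    (ms.foldl (fun a m => PySem.List.pySetD a m (0 : Int)) a).getD j 0
      = if (j : Int) ∈ ms then 0 else a.getD j 0 := by
  induction ms with
  | nil => intro a j _ _; simp
  | cons m ms ih =>
      intro a j hms hj
      have hm0 : 0 ≤ m := hms m (List.mem_cons_self)
      have hset : PySem.List.pySetD a m (0 : Int) = a.set m.toNat 0 :=
        PySem.List.pySetD_of_nonneg a 0 hm0
      have hlen : (a.set m.toNat (0 : Int)).length = a.length := by simp
      have := ih (a.set m.toNat 0) j (fun q hq => hms q (List.mem_cons_of_mem _ hq)) (by omega)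
      simp only [List.foldl, hset, this]
      by_cases hmem : (j : Int) ∈ ms
      · simp [hmem]
      · by_cases hjm : (j : Int) = m
        · have : m.toNat = j := by omega
          simp [hmem, hjm, this, List.getD_eq_getElem?_getD, List.getElem?_set, hj]
        · have : m.toNat ≠ j := by omega
          simp [hmem, hjm, List.getD_eq_getElem?_getD, List.getElem?_set, this]

-- range(p, gmax+1, p) is empty for negative p below the stop
theorem pyRange_negstep_nil (p b : Int) (h : p < 0) (h2 : p < b) : PySem.List.pyRange p b p = [] := by
  have h0 : ¬ p = 0 := by omega
  have h1 : ¬ 0 < p := by omega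
  have h3 : ¬ b < p := by omega
  simp [PySem.List.pyRange, h0, h1, h3, h2]

theorem pvMark_length (gmax p : Int) (a : List Int) : (pvMark gmax a p).length = a.length :=
  foldl_pySetD_length _ a

theorem pvMark_getD (gmax p : Int) (hp : 1 ≤ p) (a : List Int) (j : Nat) (hj : j < a.length) :
    (pvMark gmax a p).getD j 0 = if (j : Int) ∈ PySem.List.pyRange p (gmax + 1) p then 0 else a.getD j 0 := by
  apply foldl_pySetD_getD _ a j _ hj
  intro m hm
  have := (PySem.List.mem_pyRange_iff_of_pos (by omega) m).mp hm
  omega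

theorem mem_mark_range (gmax p j : Int) (hp : 1 ≤ p ∨ p < -gmax) (hj1 : 1 ≤ j) (hj2 : j ≤ gmax) :
    j ∈ PySem.List.pyRange p (gmax + 1) p ↔ p ∣ j := by
  rcases hp with hp | hp
  · rw [PySem.List.mem_pyRange_iff_of_pos (by omega)]
    constructor
    · rintro ⟨h1, h2, h3⟩
      have : j = (j - p) + p := by ring
      rw [this]; exact dvd_add h3 dvd_rfl
    · intro hd
      have hple : p ≤ j := Int.le_of_dvd (by omega) hd
      exact ⟨hple, by omega, (dvd_sub_right hd).mpr dvd_rfl⟩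
  · rw [pyRange_negstep_nil p (gmax + 1) (by omega) (by omega)]
    simp only [List.not_mem_nil, false_iff]
    intro hd
    have habs : p.natAbs ∣ j.natAbs := Int.natAbs_dvd_natAbs.mpr hd
    have : p.natAbs ≤ j.natAbs := Nat.le_of_dvd (by omega) habs
    omega

theorem foldl_pvMark_getD (gmax : Int) (hg : 0 ≤ gmax) : ∀ (qs : List Int) (a : List Int) (j : Nat),
    (∀ q ∈ qs, 1 ≤ q ∨ q < -gmax) → j < a.length →
    (qs.foldl (pvMark gmax) a).getD j 0
      = if ∃ q ∈ qs, (j : Int) ∈ PySem.List.pyRange q (gmax + 1) q then 0 else a.getD j 0 := by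
  intro qs
  induction qs with
  | nil => intro a j _ _; simp
  | cons q qs ih =>
      intro a j hqs hj
      have hq1 : 1 ≤ q ∨ q < -gmax := hqs q (List.mem_cons_self)
      have hlen : (pvMark gmax a q).length = a.length := pvMark_length gmax q a
      have := ih (pvMark gmax a q) j (fun r hr => hqs r (List.mem_cons_of_mem _ hr)) (by omega)
      simp only [List.foldl, this]
      by_cases hex : ∃ r ∈ qs, (j : Int) ∈ PySem.List.pyRange r (gmax + 1) r
      · simp [hex]
      · have hmq : (pvMark gmax a q).getD j 0
            = if (j : Int) ∈ PySem.List.pyRange q (gmax + 1) q then 0 else a.getD j 0 := by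
          rcases hq1 with hq1 | hq1
          · exact pvMark_getD gmax q hq1 a j hj
          · rw [pvMark, pyRange_negstep_nil q (gmax + 1) (by omega) (by omega)]
            simp
        rw [hmq]
        by_cases hq : (j : Int) ∈ PySem.List.pyRange q (gmax + 1) q
        · simp [hex, hq]
        · have : ¬ ∃ r ∈ q :: qs, (j : Int) ∈ PySem.List.pyRange r (gmax + 1) r := by
            push_neg at hex ⊢
            intro r hr
            rcases List.mem_cons.mp hr with h | h
            · exact h ▸ hq
            · exact hex r h
          simp [hex, hq, this]

-- value of the fully sieved table at 1 ≤ j ≤ gmax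
theorem sieved_getD (gmax : Int) (primes : List Int) (hg : 0 ≤ gmax)
    (hps : ∀ p ∈ pvTakeLe gmax primes, 1 ≤ p ∨ p < -gmax) (j : Nat) (hj1 : 1 ≤ j) (hj2 : (j : Int) ≤ gmax) :
    (pvSieve gmax (PySem.List.pySetD (List.replicate (gmax + 1).toNat (1 : Int)) 0 0) primes).getD j 0
      = if ∃ q ∈ pvTakeLe gmax primes, q ∣ (j : Int) then 0 else 1 := by
  have hset0 : PySem.List.pySetD (List.replicate (gmax + 1).toNat (1 : Int)) 0 0
      = (List.replicate (gmax + 1).toNat (1 : Int)).set 0 0 :=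
    PySem.List.pySetD_of_nonneg _ 0 (by omega)
  have hlen : (PySem.List.pySetD (List.replicate (gmax + 1).toNat (1 : Int)) 0 0).length
      = (gmax + 1).toNat := by rw [hset0]; simp
  have hjlt : j < (gmax + 1).toNat := by omega
  rw [pvSieve_eq_foldl, foldl_pvMark_getD gmax hg _ _ j hps (by omega)]
  have hbase : (PySem.List.pySetD (List.replicate (gmax + 1).toNat (1 : Int)) 0 0).getD j 0 = 1 := by
    rw [hset0]
    have h0j : (0 : Nat) ≠ j := by omega
    simp [List.getD_eq_getElem?_getD, List.getElem?_set, h0j, List.getElem?_replicate, hjlt]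
  have hiff : (∃ q ∈ pvTakeLe gmax primes, (j : Int) ∈ PySem.List.pyRange q (gmax + 1) q)
      ↔ (∃ q ∈ pvTakeLe gmax primes, q ∣ (j : Int)) := by
    constructor
    · rintro ⟨q, hq, h⟩
      exact ⟨q, hq, (mem_mark_range gmax q j (hps q hq) (by omega) hj2).mp h⟩
    · rintro ⟨q, hq, h⟩
      exact ⟨q, hq, (mem_mark_range gmax q j (hps q hq) (by omega) hj2).mpr h⟩
  exact if_congr hiff rfl hbase

-- the two prefix-building folds agree, given equal conditions on the window
theorem fold_agree (cA cB : Int → Bool) : ∀ (n : Nat) (xs : List Int) (s : Int),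
    (∀ i : Int, (xs.length : Int) ≤ i → i < (xs.length : Int) + n → cA i = cB i) →
    ((PySem.List.pyRange (xs.length : Int) ((xs.length : Int) + n) 1).foldl
        (fun (st : List Int × Int) i =>
          let s' := if cA i then st.2 + i else st.2
          (PySem.List.pySetD st.1 i s', s'))
        (xs ++ List.replicate n 0, s)).1
      = ((PySem.List.pyRange (xs.length : Int) ((xs.length : Int) + n) 1).foldl
        (fun (st : List Int × Int) i =>
          let s' := if cB i then st.2 + i else st.2
          (st.1 ++ [s'], s'))
        (xs, s)).1 := by
  intro n
  induction n with
  | zero =>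
      intro xs s _
      rw [PySem.List.pyRange_one_eq_nil (by omega)]
      simp
  | succ n ih =>
      intro xs s hc
      push_cast
      push_cast at hc
      rw [PySem.List.pyRange_one_cons (by omega : (xs.length : Int) < (xs.length : Int) + (n + 1))]
      simp only [List.foldl]
      have hcb : cA (xs.length : Int) = cB (xs.length : Int) := hc _ (le_refl _) (by omega)
      set s' : Int := if cB (xs.length : Int) then s + (xs.length : Int) else s with hs'
      have hsA : (if cA (xs.length : Int) then s + (xs.length : Int) else s) = s' := by rw [hcb]
      have hsetstep : PySem.List.pySetD (xs ++ List.replicate (n + 1) (0 : Int)) (xs.length : Int) s'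
          = (xs ++ [s']) ++ List.replicate n 0 := by
        rw [PySem.List.pySetD_of_nonneg _ _ (by omega)]
        have : ((xs.length : Int)).toNat = xs.length := by omega
        rw [this, List.set_append]
        simp [List.replicate_succ]
      have hlen1 : ((xs ++ [s']).length : Int) = (xs.length : Int) + 1 := by
        simp
      have ih' := ih (xs ++ [s']) s' (by
        intro i h1 h2
        apply hc i
        · omega
        · push_cast at h1 h2 ⊢; omega)
      rw [hlen1] at ih'
      have hend : (xs.length : Int) + 1 + n = (xs.length : Int) + (n + 1 : Nat) := by push_cast; ring
      rw [hend] at ih'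
      simp only [hsA, hsetstep]
      exact ih'

-- the sieve's verdict at i coincides with B's trial division, for 1 ≤ i ≤ gmax
theorem cond_eq (gmax : Int) (primes : List Int) (hg : 0 ≤ gmax)
    (hps : ∀ p ∈ pvTakeLe gmax primes, 1 ≤ p ∨ p < -gmax) (i : Int) (h1 : 1 ≤ i) (h2 : i ≤ gmax) :
    (PySem.List.pyGetD (pvSieve gmax (PySem.List.pySetD (List.replicate (gmax + 1).toNat (1 : Int)) 0 0) primes) i 0 != 0)
      = (pvTakeLe gmax primes).all (fun p => PySem.Int.mod i p != 0) := by
  have hi : i = ((i.toNat : Nat) : Int) := by omega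
  rw [hi, PySem.List.pyGetD_natCast,
    sieved_getD gmax primes hg hps i.toNat (by omega) (by omega)]
  by_cases hex : ∃ q ∈ pvTakeLe gmax primes, q ∣ ((i.toNat : Nat) : Int)
  · rw [if_pos hex]
    obtain ⟨q, hq, hdvd⟩ := hex
    have hm : PySem.Int.mod ((i.toNat : Nat) : Int) q = 0 := (PySem.Int.mod_eq_zero_iff_dvd _ q).mpr hdvd
    have hall : (pvTakeLe gmax primes).all (fun p => PySem.Int.mod ((i.toNat : Nat) : Int) p != 0) = false := by
      simp only [List.all_eq_false]
      exact ⟨q, hq, by rw [hm]; decide⟩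
    rw [hall]
    decide
  · rw [if_neg hex]
    push_neg at hex
    have hall : (pvTakeLe gmax primes).all (fun p => PySem.Int.mod ((i.toNat : Nat) : Int) p != 0) = true := by
      simp only [List.all_eq_true]
      intro p hp
      have hnd : ¬ p ∣ ((i.toNat : Nat) : Int) := hex p hp
      have hm0 : PySem.Int.mod ((i.toNat : Nat) : Int) p ≠ 0 :=
        fun h => hnd ((PySem.Int.mod_eq_zero_iff_dvd _ _).mp h)
      exact bne_iff_ne.mpr hm0
    rw [hall]
    decide

-- ===== VERDICT (by name: the statement is the Claim_ definition above) =====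
theorem multiplier_prefix_sum_spec : Claim_equal_multiplier_prefix_sum := by
  intro gmax primes hdom hpre
  obtain ⟨hg, htw⟩ := hpre
  have hps : ∀ p ∈ pvTakeLe gmax primes, 1 ≤ p ∨ p < -gmax := by
    rw [pvTakeLe_eq_takeWhile]; exact htw
  unfold Spec_multiplier_prefix_sum multiplier_prefix_sum multiplier_prefix_sum_alt
  simp only []
  set allowed := pvSieve gmax (PySem.List.pySetD (List.replicate (gmax + 1).toNat (1 : Int)) 0 0) primes with hallowed
  have hrep : List.replicate (gmax + 1).toNat (0 : Int) = ([0] : List Int) ++ List.replicate gmax.toNat 0 := by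
    have : (gmax + 1).toNat = gmax.toNat + 1 := by omega
    rw [this, List.replicate_succ]
    rfl
  rw [hrep]
  have := fold_agree (fun i => PySem.List.pyGetD allowed i 0 != 0)
    (fun i => (pvTakeLe gmax primes).all (fun p => PySem.Int.mod i p != 0))
    gmax.toNat ([0] : List Int) 0 (by
      intro i hi1 hi2
      simp only [List.length_cons, List.length_nil] at hi1 hi2
      exact cond_eq gmax primes hg hps i (by exact_mod_cast hi1) (by push_cast at hi2; omega))
  simp only [List.length_cons, List.length_nil] at this
  push_cast at this
  have hend : (1 : Int) + (gmax.toNat : Int) = gmax + 1 := by omega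
  rw [hend] at this
  exact this
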